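-- pv_equiv track=rewrite | github.com/dovydasjaru/DNN-translator | label_reader_writer.py | get_id_separator
-- ===== SOURCE A (Python) =====
-- __separators = [",", ";", "."]
--
-- def get_id_separator(id_and_names: str) -> str:
--     id_length = id_and_names.find(" ")
--     id_separator = " "
--     for sep in __separators:
--         separated_length = id_and_names.find(sep)
--         if id_length > separated_length != -1 or id_length == -1:
--             id_length = separated_length
--             id_separator = sep
--
--     index = id_and_names.find(id_separator)
--     if index != -1:
--         if id_and_names[index + 1] == " ":
--             id_separator += " "
--     else:
--         return ""
--     return id_separator
-- ===== SOURCE B (Python) =====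
-- def get_id_separator(id_and_names: str) -> str:
--     for i, c in enumerate(id_and_names):
--         if c in (" ", ",", ";", "."):
--             return c + " " if id_and_names[i + 1] == " " else c
--     return ""
-- ===== Notes on version B (the rewrite author's own statement) =====
-- stated objective: idiomatic
-- what changed: Replaced A's four full-string .find() scans plus a min-by-position selection loop with a single left-to-right scan that stops at the first separator character.
import Mathlib
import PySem

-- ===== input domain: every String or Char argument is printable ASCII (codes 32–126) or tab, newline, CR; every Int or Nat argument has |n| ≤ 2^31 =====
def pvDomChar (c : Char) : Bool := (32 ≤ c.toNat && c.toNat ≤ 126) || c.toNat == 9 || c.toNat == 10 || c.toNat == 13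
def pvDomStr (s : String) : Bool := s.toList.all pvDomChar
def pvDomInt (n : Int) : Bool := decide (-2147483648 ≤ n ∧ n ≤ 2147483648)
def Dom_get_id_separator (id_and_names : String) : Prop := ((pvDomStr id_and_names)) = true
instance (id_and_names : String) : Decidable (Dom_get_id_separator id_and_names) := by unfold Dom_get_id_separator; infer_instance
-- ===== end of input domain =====

-- B replaces A's four full-string .find scans plus a min-by-position fold with one left-to-right
-- scan stopping at the first separator character (objective: simpler/idiomatic, same behaviour).

-- ===== PORT A =====
-- literal transliteration of Source A: find(" "), fold over __separators = [",",";","."], then find + index lookup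
def get_id_separator (id_and_names : String) : String :=
  let id_length := PySem.Str.find id_and_names " "
  let st := [",", ";", "."].foldl (fun (st : Int × String) sep =>
    let separated_length := PySem.Str.find id_and_names sep
    if (st.1 > separated_length ∧ separated_length ≠ -1) ∨ st.1 = -1 then
      (separated_length, sep)
    else st) (id_length, " ")
  let index := PySem.Str.find id_and_names st.2
  if index ≠ -1 then
    match PySem.Str.pyGet? id_and_names (index + 1) with
    | some c => if c = ' ' then st.2 ++ " " else st.2   -- id_and_names[index + 1] == " "
    | none => ""   -- Python raises IndexError here; excluded by Pre_
  else ""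

-- ===== PORT B =====
def pvIsSep (c : Char) : Bool := c == ' ' || c == ',' || c == ';' || c == '.'

-- Source B's loop: enumerate the characters, stop at the first separator; id_and_names[i+1] is the
-- head of the remaining characters (none = Python IndexError; excluded by Pre_)
def altScan : List Char → String
  | [] => ""
  | c :: rest =>
    if pvIsSep c then
      match rest.head? with
      | some d => if d = ' ' then String.ofList [c, ' '] else String.ofList [c]
      | none => ""   -- Python raises IndexError here; excluded by Pre_
    else altScan rest

def get_id_separator_alt (id_and_names : String) : String :=
  altScan id_and_names.toList

-- ===== PRECONDITION & SPEC =====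
-- Pre_ excludes exactly the strings whose FIRST separator character is the LAST character:
-- there Python A (and Python B) raise IndexError on id_and_names[index + 1].
def Pre_get_id_separator (id_and_names : String) : Prop :=
  ¬ (id_and_names.toList.getLast?.any pvIsSep = true ∧
      ∀ x ∈ id_and_names.toList.dropLast, pvIsSep x = false)
instance (id_and_names : String) : Decidable (Pre_get_id_separator id_and_names) := by
  unfold Pre_get_id_separator; infer_instance

def pvWitness_get_id_separator : String := "1, a"

def Spec_get_id_separator (id_and_names : String) (out : String) : Prop := out = get_id_separator_alt id_and_names
instance (id_and_names : String) (out : String) : Decidable (Spec_get_id_separator id_and_names out) := by unfold Spec_get_id_separator; infer_instance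

-- ===== CLAIM (what is proved, stated in full; the proofs are below) =====
def Claim_equal_get_id_separator : Prop := ∀ (id_and_names : String), Dom_get_id_separator id_and_names → Pre_get_id_separator id_and_names → Spec_get_id_separator id_and_names (get_id_separator id_and_names)

-- ===== LEMMAS AND PROOFS =====

-- index of the first character satisfying p
def idxP (p : Char → Bool) : List Char → Option Nat
  | [] => none
  | x :: xs => if p x then some 0 else (idxP p xs).map (· + 1)

theorem idxP_eq_none_iff (p : Char → Bool) (L : List Char) :
    idxP p L = none ↔ ∀ x ∈ L, p x = false := by
  induction L with
  | nil => simp [idxP]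
  | cons a t ih =>
    simp only [idxP, List.mem_cons]
    by_cases h : p a
    · simp [h]
    · simp only [h, Bool.false_eq_true, if_false, Option.map_eq_none_iff, ih]
      constructor
      · rintro hn x (rfl | hx)
        · simpa using h
        · exact hn x hx
      · intro hall x hx
        exact hall x (Or.inr hx)

theorem idxP_eq_some (p : Char → Bool) (L : List Char) (n : Nat) (h : idxP p L = some n) :
    ∃ x, L[n]? = some x ∧ p x = true ∧ ∀ i < n, ∀ y, L[i]? = some y → p y = false := by
  induction L generalizing n with
  | nil => simp [idxP] at h
  | cons a t ih =>
    simp only [idxP] at h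
    by_cases hp : p a
    · simp [hp] at h
      subst h
      exact ⟨a, by simp, hp, by omega⟩
    · simp [hp] at h
      obtain ⟨m, hm, rfl⟩ := h
      obtain ⟨x, hx, hpx, hmin⟩ := ih m hm
      refine ⟨x, by simpa using hx, hpx, ?_⟩
      intro i hi y hy
      cases i with
      | zero => simp at hy; subst hy; simpa using hp
      | succ i' => simp at hy; exact hmin i' (by omega) y hy

theorem idxP_of_spec (p : Char → Bool) (L : List Char) (n : Nat) (x : Char)
    (hx : L[n]? = some x) (hpx : p x = true)
    (hmin : ∀ i < n, ∀ y, L[i]? = some y → p y = false) :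
    idxP p L = some n := by
  induction L generalizing n with
  | nil => simp at hx
  | cons a t ih =>
    cases n with
    | zero =>
      simp at hx; subst hx
      simp [idxP, hpx]
    | succ m =>
      have ha : p a = false := hmin 0 (by omega) a (by simp)
      simp only [idxP, ha, Bool.false_eq_true, if_false]
      have : idxP p t = some m := by
        refine ih m (by simpa using hx) ?_
        intro i hi y hy
        exact hmin (i+1) (by omega) y (by simpa using hy)
      simp [this]

theorem singleton_prefix_iff (c : Char) (M : List Char) : [c] <+: M ↔ M.head? = some c := by
  cases M with
  | nil => simp
  | cons a t => simp [List.cons_prefix_cons, eq_comm]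

theorem find_single (L : List Char) (c : Char) :
    PySem.Chars.find L [c] = (match idxP (· == c) L with | some n => (n : Int) | none => -1) := by
  by_cases hmem : c ∈ L
  · have hinf : [c] <:+: L := by
      obtain ⟨p, q, rfl⟩ := List.append_of_mem hmem
      exact ⟨p, q, by simp⟩
    have hnn : 0 ≤ PySem.Chars.find L [c] := (PySem.Chars.find_nonneg_iff L [c]).mpr hinf
    obtain ⟨hpre, hmin⟩ := PySem.Chars.find_spec hnn
    set n := (PySem.Chars.find L [c]).toNat with hn
    have hLn : L[n]? = some c := by
      rw [← List.head?_drop]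
      exact (singleton_prefix_iff c (L.drop n)).mp hpre
    have hidx : idxP (· == c) L = some n := by
      refine idxP_of_spec _ L n c hLn (by simp) ?_
      intro i hi y hy
      by_contra hne
      simp only [Bool.not_eq_false, beq_iff_eq] at hne
      subst hne
      exact hmin i hi ((singleton_prefix_iff y (L.drop i)).mpr (by rw [List.head?_drop]; exact hy))
    rw [hidx]
    show PySem.Chars.find L [c] = ((n : Nat) : Int)
    omega
  · have hidx : idxP (· == c) L = none := by
      rw [idxP_eq_none_iff]
      intro x hx
      simp only [beq_eq_false_iff_ne, ne_eq]
      rintro rfl; exact hmem hx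
    have : ¬ [c] <:+: L := by
      intro h
      exact hmem (h.subset (by simp))
    rw [hidx, (PySem.Chars.find_eq_neg_one_iff L [c]).mpr this]

theorem altScan_none (L : List Char) (h : ∀ x ∈ L, pvIsSep x = false) : altScan L = "" := by
  induction L with
  | nil => rfl
  | cons a t ih =>
    have ha : pvIsSep a = false := h a (by simp)
    simp only [altScan, ha, Bool.false_eq_true, if_false]
    exact ih (fun x hx => h x (by simp [hx]))

theorem altScan_some (L : List Char) (j : Nat) (c : Char)
    (h : idxP pvIsSep L = some j) (hc : L[j]? = some c) :
    altScan L = (match L[j+1]? with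
      | some d => if d = ' ' then String.ofList [c, ' '] else String.ofList [c]
      | none => "") := by
  induction L generalizing j with
  | nil => simp [idxP] at h
  | cons a t ih =>
    simp only [idxP] at h
    by_cases hp : pvIsSep a
    · simp [hp] at h
      subst h
      simp at hc; subst hc
      simp only [altScan, hp, if_true]
      have : (a :: t)[0+1]? = t.head? := by
        cases t <;> simp
      rw [this]
    · simp [hp] at h
      obtain ⟨m, hm, rfl⟩ := h
      simp only [altScan, hp, Bool.false_eq_true, if_false]
      have hc' : t[m]? = some c := by simpa using hc
      have h2 : (a :: t)[m+1+1]? = t[m+1]? := by simp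
      rw [h2]
      exact ih m hm hc' 

theorem pre_next (s : String) (j : Nat) (c : Char) (hp : Pre_get_id_separator s)
    (h : idxP pvIsSep s.toList = some j) (hc : s.toList[j]? = some c) :
    j + 1 < s.toList.length := by
  obtain ⟨x, hx, hpx, hmin⟩ := idxP_eq_some pvIsSep s.toList j h
  have hx' : x = c := by rw [hx] at hc; simpa using hc
  subst hx'
  have hj : j < s.toList.length := by
    by_contra hge
    rw [List.getElem?_eq_none (by omega)] at hx
    simp at hx
  by_contra hge
  have hjeq : j = s.toList.length - 1 := by omega
  apply hp
  refine ⟨?_, ?_⟩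
  · rw [List.getLast?_eq_getElem?, ← hjeq, hx]
    simpa using hpx
  · intro y hy
    obtain ⟨i, hi, hiy⟩ := List.mem_iff_getElem.mp hy
    have hlen : s.toList.dropLast.length = s.toList.length - 1 := by simp
    have : s.toList[i]? = some y := by
      rw [List.getElem?_eq_getElem (by omega)]
      rw [← hiy, List.getElem_dropLast]
    exact hmin i (by omega) y this

theorem pyGet?_succ (s : String) (j : Nat) :
    PySem.Str.pyGet? s ((j : Int) + 1) = s.toList[j+1]? := by
  have := PySem.Str.pyGet?_natCast s (j+1)
  push_cast at this ⊢
  simpa using this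

-- ===== VERDICT (by name: the statement is the Claim_ definition above) =====
set_option maxHeartbeats 2000000 in
theorem get_id_separator_spec : Claim_equal_get_id_separator := by
  intro s _ hpre
  unfold Spec_get_id_separator get_id_separator get_id_separator_alt
  cases hidx : idxP pvIsSep s.toList with
  | none =>
    have hall := (idxP_eq_none_iff pvIsSep s.toList).mp hidx
    have hnone : ∀ ch : Char, pvIsSep ch = true → PySem.Chars.find s.toList [ch] = -1 := by
      intro ch hch
      rw [find_single]
      have hn : idxP (· == ch) s.toList = none := by
        rw [idxP_eq_none_iff]
        intro x hx
        have hx' := hall x hx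
        simp only [beq_eq_false_iff_ne, ne_eq]
        rintro rfl
        rw [hx'] at hch; exact Bool.false_ne_true hch
      rw [hn]
    have E1 : PySem.Str.find s " " = -1 := by rw [PySem.Str.find_eq]; exact hnone ' ' (by decide)
    have E2 : PySem.Str.find s "," = -1 := by rw [PySem.Str.find_eq]; exact hnone ',' (by decide)
    have E3 : PySem.Str.find s ";" = -1 := by rw [PySem.Str.find_eq]; exact hnone ';' (by decide)
    have E4 : PySem.Str.find s "." = -1 := by rw [PySem.Str.find_eq]; exact hnone '.' (by decide)
    rw [altScan_none s.toList hall]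
    simp only [List.foldl]
    rw [E1, E2, E3, E4]
    split_ifs <;> first | rfl | (dsimp only at * ; rw [E4] at * <;> omega) | omega
  | some j =>
    obtain ⟨c, hc, hcsep, hmin⟩ := idxP_eq_some pvIsSep s.toList j hidx
    have hnext := pre_next s j c hpre hidx hc
    obtain ⟨d, hd⟩ : ∃ d, s.toList[j+1]? = some d :=
      ⟨_, List.getElem?_eq_getElem hnext⟩
    have hfc : PySem.Chars.find s.toList [c] = (j : Int) := by
      rw [find_single]
      have hx : idxP (· == c) s.toList = some j := by
        refine idxP_of_spec _ _ j c hc (by simp) ?_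
        intro i hi y hy
        have h0 := hmin i hi y hy
        simp only [beq_eq_false_iff_ne, ne_eq]
        rintro rfl
        rw [h0] at hcsep; exact Bool.false_ne_true hcsep
      rw [hx]
    have hother : ∀ ch : Char, pvIsSep ch = true → ch ≠ c →
        (PySem.Chars.find s.toList [ch] = -1 ∨ (j : Int) < PySem.Chars.find s.toList [ch]) := by
      intro ch hch hne
      rw [find_single]
      cases hk : idxP (· == ch) s.toList with
      | none => exact Or.inl rfl
      | some k =>
        obtain ⟨y, hy, hpy, _⟩ := idxP_eq_some _ _ k hk
        have hyc : y = ch := by simpa using hpy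
        subst hyc
        have hk1 : ¬ k < j := by
          intro hlt
          have h0 := hmin k hlt y hy
          rw [h0] at hch; exact Bool.false_ne_true hch
        have hk2 : k ≠ j := by
          rintro rfl
          rw [hy] at hc
          exact hne (Option.some_injective _ hc)
        exact Or.inr (by simp only; omega)
    rw [altScan_some s.toList j c hidx hc, hd]
    simp only [List.foldl]
    have hcases : c = ' ' ∨ c = ',' ∨ c = ';' ∨ c = '.' := by
      have h0 := hcsep
      unfold pvIsSep at h0
      simp only [Bool.or_eq_true, beq_iff_eq] at h0
      tauto
    rcases hcases with rfl | rfl | rfl | rfl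
    · have HF : PySem.Str.find s " " = (j : Int) := by rw [PySem.Str.find_eq]; exact hfc
      have H2 : PySem.Str.find s "," = -1 ∨ (j : Int) < PySem.Str.find s "," := by
        rw [PySem.Str.find_eq]; exact hother ',' (by decide) (by decide)
      have H3 : PySem.Str.find s ";" = -1 ∨ (j : Int) < PySem.Str.find s ";" := by
        rw [PySem.Str.find_eq]; exact hother ';' (by decide) (by decide)
      have H4 : PySem.Str.find s "." = -1 ∨ (j : Int) < PySem.Str.find s "." := by
        rw [PySem.Str.find_eq]; exact hother '.' (by decide) (by decide)
      rw [HF]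
      split_ifs <;>
        dsimp only at * <;>
        simp only [HF, or_false, false_or] at * <;>
        first
          | omega
          | (rw [pyGet?_succ, hd]
             dsimp only
             split_ifs <;> first | decide | tauto)
    · have HF : PySem.Str.find s "," = (j : Int) := by rw [PySem.Str.find_eq]; exact hfc
      have H1 : PySem.Str.find s " " = -1 ∨ (j : Int) < PySem.Str.find s " " := by
        rw [PySem.Str.find_eq]; exact hother ' ' (by decide) (by decide)
      have H3 : PySem.Str.find s ";" = -1 ∨ (j : Int) < PySem.Str.find s ";" := by
        rw [PySem.Str.find_eq]; exact hother ';' (by decide) (by decide)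
      have H4 : PySem.Str.find s "." = -1 ∨ (j : Int) < PySem.Str.find s "." := by
        rw [PySem.Str.find_eq]; exact hother '.' (by decide) (by decide)
      rw [HF]
      split_ifs <;>
        dsimp only at * <;>
        simp only [HF, or_false, false_or] at * <;>
        first
          | omega
          | (rw [pyGet?_succ, hd]
             dsimp only
             split_ifs <;> first | decide | tauto)
    · have HF : PySem.Str.find s ";" = (j : Int) := by rw [PySem.Str.find_eq]; exact hfc
      have H1 : PySem.Str.find s " " = -1 ∨ (j : Int) < PySem.Str.find s " " := by
        rw [PySem.Str.find_eq]; exact hother ' ' (by decide) (by decide)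
      have H2 : PySem.Str.find s "," = -1 ∨ (j : Int) < PySem.Str.find s "," := by
        rw [PySem.Str.find_eq]; exact hother ',' (by decide) (by decide)
      have H4 : PySem.Str.find s "." = -1 ∨ (j : Int) < PySem.Str.find s "." := by
        rw [PySem.Str.find_eq]; exact hother '.' (by decide) (by decide)
      rw [HF]
      split_ifs <;>
        dsimp only at * <;>
        simp only [HF, or_false, false_or] at * <;>
        first
          | omega
          | (rw [pyGet?_succ, hd]
             dsimp only
             split_ifs <;> first | decide | tauto)
    · have HF : PySem.Str.find s "." = (j : Int) := by rw [PySem.Str.find_eq]; exact hfc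
      have H1 : PySem.Str.find s " " = -1 ∨ (j : Int) < PySem.Str.find s " " := by
        rw [PySem.Str.find_eq]; exact hother ' ' (by decide) (by decide)
      have H2 : PySem.Str.find s "," = -1 ∨ (j : Int) < PySem.Str.find s "," := by
        rw [PySem.Str.find_eq]; exact hother ',' (by decide) (by decide)
      have H3 : PySem.Str.find s ";" = -1 ∨ (j : Int) < PySem.Str.find s ";" := by
        rw [PySem.Str.find_eq]; exact hother ';' (by decide) (by decide)
      rw [HF]
      split_ifs <;>
        dsimp only at * <;>
        simp only [HF, or_false, false_or] at * <;>
        first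
          | omega
          | (rw [pyGet?_succ, hd]
             dsimp only
             split_ifs <;> first | decide | tauto)
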